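-- pv_equiv track=rewrite | github.com/ELLYLY2015/CS61A | Project/typing.py | swap_diff
-- ===== SOURCE A (Python) =====
-- def swap_diff(start, goal, limit):
--     """A diff function for autocorrect that determines how many letters
--     in START need to be substituted to create GOAL, then adds the difference in
--     their lengths.
--     """
--     # BEGIN PROBLEM 6
--     if limit < 0:
--         return 0
--     if min(len(start), len(goal)) == 0:
--         return max(len(start), len(goal))
--     if start[0] == goal[0]:
--         return swap_diff(start[1:], goal[1:], limit)
--     else:
--         return swap_diff(start[1:], goal[1:],limit -1) + 1
-- ===== SOURCE B (Python) =====
-- def swap_diff(start, goal, limit):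
--     m = sum(1 for a, b in zip(start, goal) if a != b)
--     d = abs(len(start) - len(goal))
--     if limit < 0:
--         return 0
--     if m <= limit:
--         return m + d
--     return limit + 1
-- ===== Notes on version B (the rewrite author's own statement) =====
-- stated objective: faster
-- what changed: Replaces the per-character recursion (which copies both strings with s[1:] at every step) with two aggregate passes (mismatch count over zip, length difference) and a constant-time three-way branch.
import Mathlib
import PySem

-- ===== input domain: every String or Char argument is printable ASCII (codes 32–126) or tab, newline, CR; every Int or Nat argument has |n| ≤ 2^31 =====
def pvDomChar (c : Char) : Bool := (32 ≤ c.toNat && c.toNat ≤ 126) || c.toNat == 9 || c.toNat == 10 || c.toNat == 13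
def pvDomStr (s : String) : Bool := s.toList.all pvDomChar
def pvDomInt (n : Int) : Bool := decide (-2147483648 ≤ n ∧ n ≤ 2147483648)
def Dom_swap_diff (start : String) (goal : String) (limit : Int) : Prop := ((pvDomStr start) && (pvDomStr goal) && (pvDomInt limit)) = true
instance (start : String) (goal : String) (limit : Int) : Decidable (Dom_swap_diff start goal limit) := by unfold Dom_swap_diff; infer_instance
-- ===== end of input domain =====

-- B replaces A's per-character recursion by two aggregate counts and a closed-form branch (simpler; same return value everywhere).

-- ===== PORT A =====
-- A's recursion, transliterated over the character lists (s[1:] = tail, s[0] = head).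
def swapDiffRec (s : List Char) (g : List Char) (limit : Int) : Int :=
  if limit < 0 then 0
  else if Nat.min s.length g.length = 0 then (Nat.max s.length g.length : Int)
  else match s, g with
    | a :: s', b :: g' =>
        if a = b then swapDiffRec s' g' limit
        else swapDiffRec s' g' (limit - 1) + 1
    | _, _ => 0   -- unreachable: both lists nonempty here
termination_by s.length

def swap_diff (start : String) (goal : String) (limit : Int) : Int :=
  swapDiffRec start.toList goal.toList limit

-- ===== PORT B =====
def swap_diff_alt (start : String) (goal : String) (limit : Int) : Int :=
  let m : Nat := ((start.toList.zip goal.toList).filter (fun p => p.1 ≠ p.2)).length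
  let d : Nat := ((start.toList.length : Int) - (goal.toList.length : Int)).natAbs
  if limit < 0 then 0
  else if (m : Int) ≤ limit then (m : Int) + (d : Int)
  else limit + 1

-- ===== PRECONDITION & SPEC =====
def Spec_swap_diff (start : String) (goal : String) (limit : Int) (out : Int) : Prop := out = swap_diff_alt start goal limit
instance (start : String) (goal : String) (limit : Int) (out : Int) : Decidable (Spec_swap_diff start goal limit out) := by unfold Spec_swap_diff; infer_instance

-- ===== CLAIM (what is proved, stated in full; the proofs are below) =====
def Claim_equal_swap_diff : Prop := ∀ (start : String) (goal : String) (limit : Int), Dom_swap_diff start goal limit → Spec_swap_diff start goal limit (swap_diff start goal limit)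

-- ===== LEMMAS AND PROOFS =====

theorem swapDiffRec_closed (s g : List Char) (limit : Int) :
    swapDiffRec s g limit =
      if limit < 0 then 0
      else if ((((s.zip g).filter (fun p => p.1 ≠ p.2)).length : Int) ≤ limit) then
        (((s.zip g).filter (fun p => p.1 ≠ p.2)).length : Int) + (((s.length : Int) - (g.length : Int)).natAbs : Int)
      else limit + 1 := by
  induction s generalizing g limit with
  | nil =>
    unfold swapDiffRec
    simp only [List.zip_nil_left, List.filter_nil, List.length_nil, Nat.cast_zero,
      Nat.zero_min, Nat.zero_max]
    split_ifs <;> omega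
  | cons a s' ih =>
    cases g with
    | nil =>
      unfold swapDiffRec
      simp only [List.zip_nil_right, List.filter_nil, List.length_nil, List.length_cons,
        Nat.cast_zero, Nat.min_zero, Nat.max_zero]
      split_ifs <;> omega
    | cons b g' =>
      unfold swapDiffRec
      by_cases hl : limit < 0
      · simp [hl]
      · have hmin : ¬ Nat.min (a :: s').length (b :: g').length = 0 := by simp
        rw [if_neg hl, if_neg hmin]
        have hred : (match a :: s', b :: g' with
            | a :: s', b :: g' =>
                if a = b then swapDiffRec s' g' limit else swapDiffRec s' g' (limit - 1) + 1
            | _, _ => 0) =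
            if a = b then swapDiffRec s' g' limit else swapDiffRec s' g' (limit - 1) + 1 := rfl
        rw [hred]
        by_cases hab : a = b
        · subst hab
          rw [if_pos rfl, ih g' limit, if_neg hl]
          have hd : (((((a :: s').length : Int)) - (((a :: g').length : Int))).natAbs : Int)
              = (((s'.length : Int) - (g'.length : Int)).natAbs : Int) := by
            simp only [List.length_cons]; omega
          simp only [List.zip_cons_cons, List.filter_cons]
          rw [hd]
          simp [hl]
        · rw [if_neg hab, ih g' (limit - 1)]
          simp only [List.zip_cons_cons, List.filter_cons, decide_not]
          have : (decide ((a, b).1 = (a, b).2)) = false := by simp [hab]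
          simp only [this, Bool.not_false, if_true, List.length_cons]
          split_ifs <;> omega

-- ===== VERDICT (by name: the statement is the Claim_ definition above) =====
theorem swap_diff_spec : Claim_equal_swap_diff := by
  intro start goal limit _
  unfold Spec_swap_diff swap_diff swap_diff_alt
  rw [swapDiffRec_closed]
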